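-- pv_equiv track=rewrite | github.com/Giannie/Blocking-Test | blocking.py | is_dependent_combo
-- ===== SOURCE A (Python) =====
-- import itertools
--
-- def is_dependent_combo(combo, combos):
--     """Checks if a combination is already caught in a smaller subject combo"""
--     # Can't had a combo less than 3 fail
--     if len(combo) <= 2:
--         return False
--
--     # Check all smaller combinations of combo and check if any are in combos
--     for i in range(2, len(combo)):
--         for sub in itertools.combinations(combo, i):
--             if sub in combos:
--                 return True
--     return False
-- ===== SOURCE B (Python) =====
-- def _is_subseq(c, combo):
--     """Order-preserving subsequence test via a single shared iterator pass."""
--     it = iter(combo)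
--     return all(x in it for x in c)
--
-- def is_dependent_combo(combo, combos):
--     """Checks if a combination is already caught in a smaller subject combo"""
--     n = len(combo)
--     if n <= 2:
--         return False
--     # A smaller combination of combo is exactly a proper subsequence of combo
--     # of length 2..n-1, so scan combos once instead of enumerating 2^n subsets.
--     for c in combos:
--         if 2 <= len(c) < n and _is_subseq(c, combo):
--             return True
--     return False
-- ===== Notes on version B (the rewrite author's own statement) =====
-- stated objective: faster
-- what changed: Instead of enumerating all O(2^n) sub-combinations of combo and testing each for membership in combos, B scans combos once and tests each candidate of length 2..len(combo)-1 as an order-preserving subsequence of combo in one linear pass.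
import Mathlib
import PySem

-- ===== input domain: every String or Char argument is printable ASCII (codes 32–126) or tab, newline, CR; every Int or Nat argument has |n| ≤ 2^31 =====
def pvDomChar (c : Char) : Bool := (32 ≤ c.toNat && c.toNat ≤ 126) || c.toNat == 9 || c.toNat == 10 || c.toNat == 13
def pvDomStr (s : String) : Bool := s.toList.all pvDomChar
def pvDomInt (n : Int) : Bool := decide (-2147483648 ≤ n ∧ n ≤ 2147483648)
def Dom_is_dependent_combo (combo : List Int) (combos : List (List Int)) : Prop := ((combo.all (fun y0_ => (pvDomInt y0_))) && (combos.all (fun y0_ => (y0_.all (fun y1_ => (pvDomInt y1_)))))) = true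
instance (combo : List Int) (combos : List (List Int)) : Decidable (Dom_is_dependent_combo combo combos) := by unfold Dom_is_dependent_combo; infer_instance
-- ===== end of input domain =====

-- B replaces A's O(2^n) enumeration of all sub-combinations by a single scan of combos
-- with a linear order-preserving-subsequence test per candidate.

-- ===== PORT A =====
-- itertools.combinations(xs, r), in itertools' emission order (lexicographic by index)
def pyCombinations (r : Nat) (xs : List Int) : List (List Int) :=
  match r, xs with
  | 0, _ => [[]]
  | _ + 1, [] => []
  | r + 1, x :: xs => (pyCombinations r xs).map (fun t => x :: t) ++ pyCombinations (r + 1) xs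

def is_dependent_combo (combo : List Int) (combos : List (List Int)) : Bool :=
  if combo.length ≤ 2 then false
  else
    (PySem.List.pyRange 2 (combo.length : Int) 1).any (fun i =>
      (pyCombinations i.toNat combo).any (fun sub => combos.contains sub))

-- ===== PORT B =====
-- _is_subseq's shared-iterator pass is exactly List.isSublist's greedy recursion
def is_dependent_combo_alt (combo : List Int) (combos : List (List Int)) : Bool :=
  if combo.length ≤ 2 then false
  else
    combos.any (fun c =>
      decide (2 ≤ c.length) && decide (c.length < combo.length) && c.isSublist combo)

-- ===== PRECONDITION & SPEC =====
def Spec_is_dependent_combo (combo : List Int) (combos : List (List Int)) (out : Bool) : Prop := out = is_dependent_combo_alt combo combos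
instance (combo : List Int) (combos : List (List Int)) (out : Bool) : Decidable (Spec_is_dependent_combo combo combos out) := by unfold Spec_is_dependent_combo; infer_instance

-- ===== CLAIM (what is proved, stated in full; the proofs are below) =====
def Claim_equal_is_dependent_combo : Prop := ∀ (combo : List Int) (combos : List (List Int)), Dom_is_dependent_combo combo combos → Spec_is_dependent_combo combo combos (is_dependent_combo combo combos)

-- ===== LEMMAS AND PROOFS =====

-- characterisation of A's enumeration: members of pyCombinations r xs are exactly
-- the length-r sublists (order-preserving subsequences) of xs
theorem mem_pyCombinations (sub xs : List Int) (r : Nat) :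
    sub ∈ pyCombinations r xs ↔ sub.length = r ∧ sub.Sublist xs := by
  induction xs generalizing sub r with
  | nil =>
    cases r with
    | zero =>
      simp [pyCombinations, List.sublist_nil, List.length_eq_zero_iff]
    | succ r =>
      simp [pyCombinations, List.sublist_nil]
      rintro h rfl; simp at h
  | cons x xs ih =>
    cases r with
    | zero =>
      simp [pyCombinations, List.length_eq_zero_iff]
      rintro rfl; exact List.nil_sublist _
    | succ r =>
      simp only [pyCombinations, List.mem_append, List.mem_map, ih]
      rw [List.sublist_cons_iff]
      constructor
      · rintro (⟨t, ⟨hlen, hsub⟩, rfl⟩ | ⟨hlen, hsub⟩)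
        · exact ⟨by simp [hlen], Or.inr ⟨t, rfl, hsub⟩⟩
        · exact ⟨hlen, Or.inl hsub⟩
      · rintro ⟨hlen, hsub | ⟨t, rfl, ht⟩⟩
        · exact Or.inr ⟨hlen, hsub⟩
        · exact Or.inl ⟨t, ⟨by simpa using hlen, ht⟩, rfl⟩

-- ===== VERDICT (by name: the statement is the Claim_ definition above) =====
theorem is_dependent_combo_spec : Claim_equal_is_dependent_combo := by
  intro combo combos _
  unfold Spec_is_dependent_combo is_dependent_combo is_dependent_combo_alt
  split
  · rfl
  · rename_i hlen
    rw [Bool.eq_iff_iff]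
    simp only [List.any_eq_true, PySem.List.mem_pyRange_one,
      Bool.and_eq_true, decide_eq_true_eq, List.isSublist_iff_sublist, List.contains_iff_mem]
    constructor
    · rintro ⟨i, ⟨h2, hi⟩, sub, hsub, hmem⟩
      rw [mem_pyCombinations] at hsub
      refine ⟨sub, hmem, ⟨?_, ?_⟩, hsub.2⟩
      · omega
      · have : (sub.length : Int) = i := by rw [hsub.1]; omega
        omega
    · rintro ⟨c, hc, ⟨h2, hlt⟩, hsub⟩
      refine ⟨(c.length : Int), ⟨by omega, by omega⟩, c, ?_, hc⟩
      rw [mem_pyCombinations]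
      exact ⟨by simp, hsub⟩
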